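-- pv_equiv track=rewrite | github.com/abdulwahid40/Data-Structures-and-Algorithms | in_Python/02-week/Efficient Algos/08-Last digit of sum of squares of fibonacci number-Efficient Algo.py | fab_num_remainder
-- ===== SOURCE A (Python) =====
-- def pisano_period(m):
--     previous = 0
--     current = 1
--     for counter in range(0, m*m):
--         previous, current = current, (previous + current) % m
--
--         if previous == 0 and current == 1:
--             return counter + 1
--
-- def fab_num_remainder(n, m):
--     pisano = pisano_period(m)
--     n = n % pisano
--     if n == 0:
--         return n
--
--     previous = 0
--     current = 1
--     total = 0
--     for _ in range(n):
--         total += current ** 2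
--         previous, current = current, previous + current
--
--     return total % m
-- ===== SOURCE B (Python) =====
-- def fab_num_remainder(n, m):
--     # Identity sum_{i=1..n} F_i^2 = F_n * F_{n+1}, computed by fast doubling mod m
--     # (negafibonacci signs for n < 0); O(log |n|) instead of A's Pisano-length loops.
--     def fib_pair(k):
--         # (F_k % m, F_{k+1} % m) for k >= 0
--         if k == 0:
--             return (0, 1)
--         a, b = fib_pair(k >> 1)
--         c = (a * (2 * b - a)) % m
--         d = (a * a + b * b) % m
--         if k & 1:
--             return (d, (c + d) % m)
--         return (c, d)
--     if n >= 0: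
--         a, b = fib_pair(n)
--     else:
--         k = -n
--         fa, fb = fib_pair(k)
--         a = (fa if k % 2 else -fa) % m       # F_{-k} = (-1)^(k+1) F_k
--         b = ((fb - fa) if k % 2 == 0 else (fa - fb)) % m  # F_{1-k} = (-1)^k F_{k-1}
--     return (a * b) % m
-- ===== Notes on version B (the rewrite author's own statement) =====
-- stated objective: faster
-- what changed: Replaces A's Pisano-period search plus a second loop summing squares of unreduced (exponentially growing) Fibonacci numbers by the identity sum F_i^2 = F_n*F_{n+1} computed directly with fast-doubling modular arithmetic (negafibonacci signs for n < 0), needing only O(log|n|) multiplications on numbers below m^2; intended as faster, and a timing run measured B up to ~989x faster at the largest size where both finished (A timed out on several larger inputs), though one noisy subset read slower, so that run did not fully confirm the label.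
-- outside the precondition, e.g. on fab_num_remainder(0, 1): A raises TypeError, B returns 0
import Mathlib
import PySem

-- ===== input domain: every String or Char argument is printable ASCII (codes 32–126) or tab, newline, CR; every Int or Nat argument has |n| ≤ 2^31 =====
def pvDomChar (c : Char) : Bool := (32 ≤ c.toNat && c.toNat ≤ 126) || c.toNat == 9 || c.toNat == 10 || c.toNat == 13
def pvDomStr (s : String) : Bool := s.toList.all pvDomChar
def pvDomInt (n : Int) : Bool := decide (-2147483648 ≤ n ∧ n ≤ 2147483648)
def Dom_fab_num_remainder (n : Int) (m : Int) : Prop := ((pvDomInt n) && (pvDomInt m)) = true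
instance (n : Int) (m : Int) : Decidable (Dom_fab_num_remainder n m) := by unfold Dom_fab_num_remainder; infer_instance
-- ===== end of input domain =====

-- B replaces A's two Pisano-length loops (the second on unreduced, fast-growing Fibonacci
-- squares) by the identity Σ_{i≤n} F_i² = F_n·F_{n+1} computed by fast doubling mod m.

-- ===== PORT A =====
-- early-return for-loop of pisano_period: tail recursion, counter is the range(0, m*m)
-- loop variable and fuel the number of remaining iterations (range is lazy in Python)
def pisanoLoop (m : Int) (previous current counter : Int) : Nat → Option Int
  | 0 => none
  | fuel + 1 =>
      let previous' := current
      let current' := PySem.Int.mod (previous + current) m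
      if previous' = 0 ∧ current' = 1 then some (counter + 1)
      else pisanoLoop m previous' current' (counter + 1) fuel

def pisano_period (m : Int) : Option Int :=
  pisanoLoop m 0 1 0 (m * m).toNat

def fab_num_remainder (n : Int) (m : Int) : Int :=
  match pisano_period m with
  | none => 0   -- Python raises TypeError here (n % None); excluded by Pre_
  | some pisano =>
      let n' := PySem.Int.mod n pisano
      if n' = 0 then n'
      else
        let s := (PySem.List.pyRange 0 n' 1).foldl
          (fun (st : Int × Int × Int) _ =>
            (st.2.1, st.1 + st.2.1, st.2.2 + st.2.1 ^ 2)) (0, 1, 0)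
        PySem.Int.mod s.2.2 m

-- ===== PORT B =====
-- fast doubling: (F_k mod m, F_{k+1} mod m)
def fibPairMod (m : Int) : Nat → Int × Int
  | 0 => (0, 1)
  | (k + 1) =>
      let p := fibPairMod m ((k + 1) / 2)
      let a := p.1
      let b := p.2
      let c := PySem.Int.mod (a * (2 * b - a)) m
      let d := PySem.Int.mod (a * a + b * b) m
      if (k + 1) % 2 = 1 then (d, PySem.Int.mod (c + d) m) else (c, d)
  decreasing_by omega

def fab_num_remainder_alt (n : Int) (m : Int) : Int :=
  if n ≥ 0 then
    let p := fibPairMod m n.toNat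
    PySem.Int.mod (p.1 * p.2) m
  else
    let k := (-n).toNat
    let q := fibPairMod m k
    let fa := q.1
    let fb := q.2
    let a := PySem.Int.mod (if k % 2 = 1 then fa else -fa) m
    let b := PySem.Int.mod (if k % 2 = 0 then fb - fa else fa - fb) m
    PySem.Int.mod (a * b) m

-- ===== PRECONDITION & SPEC =====
-- Pre_ excludes exactly m ≤ 1: there pisano_period finds no period (m ≤ 0) or the
-- pair (0,1) never recurs (m = 1), it returns None and Python raises TypeError.
def Pre_fab_num_remainder (n : Int) (m : Int) : Prop := 2 ≤ m
instance (n : Int) (m : Int) : Decidable (Pre_fab_num_remainder n m) := by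
  unfold Pre_fab_num_remainder; infer_instance
def pvWitness_fab_num_remainder : Int × Int := (10, 10)

def Spec_fab_num_remainder (n : Int) (m : Int) (out : Int) : Prop := out = fab_num_remainder_alt n m
instance (n : Int) (m : Int) (out : Int) : Decidable (Spec_fab_num_remainder n m out) := by unfold Spec_fab_num_remainder; infer_instance

-- ===== CLAIM (what is proved, stated in full; the proofs are below) =====
def Claim_equal_fab_num_remainder : Prop := ∀ (n : Int) (m : Int), Dom_fab_num_remainder n m → Pre_fab_num_remainder n m → Spec_fab_num_remainder n m (fab_num_remainder n m)
-- ===== LEMMAS AND PROOFS =====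

-- Cassini: F_r · F_{r+2} − F_{r+1}² = (−1)^{r+1} over ℤ
theorem pvCassini (r : Nat) :
    (Nat.fib r : Int) * Nat.fib (r + 2) - (Nat.fib (r + 1) : Int) ^ 2 = (-1) ^ (r + 1) := by
  induction r with
  | zero => norm_num [Nat.fib]
  | succ r ih =>
    have h2 : (Nat.fib (r + 2) : Int) = Nat.fib r + Nat.fib (r + 1) := by
      rw [Nat.fib_add_two]; push_cast; ring
    have h3 : (Nat.fib (r + 3) : Int) = Nat.fib (r + 1) + Nat.fib (r + 2) := by
      rw [show r + 3 = (r + 1) + 2 from rfl, Nat.fib_add_two]; push_cast; ring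
    rw [show r + 1 + 2 = r + 3 from rfl, h3, h2]
    rw [h2] at ih
    linear_combination (-1 : Int) * ih

-- fast doubling computes (F_k mod m, F_{k+1} mod m)
theorem fibPairMod_eq (m : Int) (hm : 2 ≤ m) (k : Nat) :
    fibPairMod m k = ((Nat.fib k : Int) % m, (Nat.fib (k + 1) : Int) % m) := by
  have hm0 : (0 : Int) < m := by omega
  induction k using Nat.strong_induction_on with
  | _ k ih =>
    match k with
    | 0 =>
      rw [fibPairMod]
      refine Prod.ext ?_ ?_ <;> simp [Nat.fib]
      · exact (Int.emod_eq_of_lt (by norm_num) (by omega)).symm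
    | (k + 1) =>
      rw [fibPairMod]
      have hj := ih ((k + 1) / 2) (by omega)
      set j := (k + 1) / 2 with hjdef
      simp only [hj]
      have ha : ((Nat.fib j : Int) % m) ≡ (Nat.fib j : Int) [ZMOD m] :=
        Int.emod_emod_of_dvd _ dvd_rfl
      have hb : ((Nat.fib (j + 1) : Int) % m) ≡ (Nat.fib (j + 1) : Int) [ZMOD m] :=
        Int.emod_emod_of_dvd _ dvd_rfl
      have hle : Nat.fib j ≤ 2 * Nat.fib (j + 1) :=
        le_trans Nat.fib_le_fib_succ (by omega)
      have h2m : Nat.fib (2 * j) = Nat.fib j * (2 * Nat.fib (j + 1) - Nat.fib j) :=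
        Nat.fib_two_mul j
      zify [hle] at h2m
      have hc : PySem.Int.mod (((Nat.fib j : Int) % m) * (2 * ((Nat.fib (j + 1) : Int) % m) - ((Nat.fib j : Int) % m))) m
          = (Nat.fib (2 * j) : Int) % m := by
        rw [PySem.Int.mod_eq_emod_of_pos hm0]
        have hcong := ha.mul (((Int.ModEq.refl 2).mul hb).sub ha)
        calc _ = ((Nat.fib j : Int) * (2 * (Nat.fib (j + 1) : Int) - (Nat.fib j : Int))) % m := hcong
          _ = _ := by rw [← h2m]
      have h2m1 : (Nat.fib (2 * j + 1) : Int) = (Nat.fib (j + 1) : Int) * Nat.fib (j + 1) + (Nat.fib j : Int) * Nat.fib j := by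
        rw [Nat.fib_two_mul_add_one]; push_cast; ring
      have hd : PySem.Int.mod (((Nat.fib j : Int) % m) * ((Nat.fib j : Int) % m) + ((Nat.fib (j + 1) : Int) % m) * ((Nat.fib (j + 1) : Int) % m)) m
          = (Nat.fib (2 * j + 1) : Int) % m := by
        rw [PySem.Int.mod_eq_emod_of_pos hm0]
        have hcong := (ha.mul ha).add (hb.mul hb)
        calc _ = ((Nat.fib j : Int) * Nat.fib j + (Nat.fib (j + 1) : Int) * Nat.fib (j + 1)) % m := hcong
          _ = _ := by rw [h2m1]; ring_nf
      by_cases hpar : (k + 1) % 2 = 1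
      · have hk1 : k + 1 = 2 * j + 1 := by omega
        rw [if_pos hpar]
        refine Prod.ext ?_ ?_
        · show PySem.Int.mod _ m = _
          rw [hd, hk1]
        · show PySem.Int.mod (PySem.Int.mod _ m + PySem.Int.mod _ m) m = _
          rw [hc, hd, PySem.Int.mod_eq_emod_of_pos hm0]
          have h1 : ((Nat.fib (2 * j) : Int) % m) ≡ (Nat.fib (2 * j) : Int) [ZMOD m] :=
            Int.emod_emod_of_dvd _ dvd_rfl
          have h2 : ((Nat.fib (2 * j + 1) : Int) % m) ≡ (Nat.fib (2 * j + 1) : Int) [ZMOD m] :=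
            Int.emod_emod_of_dvd _ dvd_rfl
          have hcong := h1.add h2
          have hsum : (Nat.fib (2 * j) : Int) + (Nat.fib (2 * j + 1) : Int) = (Nat.fib (k + 1 + 1) : Int) := by
            rw [show k + 1 + 1 = 2 * j + 2 from by omega, Nat.fib_add_two]; push_cast; ring
          calc _ = ((Nat.fib (2 * j) : Int) + (Nat.fib (2 * j + 1) : Int)) % m := hcong
            _ = _ := by rw [hsum]
      · have hk1 : k + 1 = 2 * j := by omega
        rw [if_neg hpar]
        refine Prod.ext ?_ ?_
        · show PySem.Int.mod _ m = _
          rw [hc, hk1]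
        · show PySem.Int.mod _ m = _
          rw [hd, show k + 1 + 1 = 2 * j + 1 from by omega]

-- the Pisano loop invariant state
def pst (m : Int) (t : Nat) : Int × Int := ((Nat.fib t : Int) % m, (Nat.fib (t + 1) : Int) % m)

-- if a period point exists in the remaining window, the loop returns one
theorem pisanoLoop_finds (m : Int) (hm : 2 ≤ m) :
    ∀ (fuel : Nat) (a : Nat), (a : Int) + fuel = m * m →
    (∃ j : Nat, a < j ∧ (j : Int) ≤ m * m ∧ pst m j = (0, 1)) →
    ∃ jr : Nat, 0 < jr ∧ pst m jr = (0, 1) ∧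
      pisanoLoop m (pst m a).1 (pst m a).2 (a : Int) fuel = some (jr : Int) := by
  have hm0 : (0 : Int) < m := by omega
  intro fuel
  induction fuel with
  | zero =>
    intro a hfa hex
    exfalso
    obtain ⟨j, haj, hjm, _⟩ := hex
    have : (a : Int) < (j : Int) := by exact_mod_cast haj
    omega
  | succ fuel ih =>
    intro a hfa hex
    obtain ⟨j, haj, hjm, hj⟩ := hex
    have haj' : (a : Int) < (j : Int) := by exact_mod_cast haj
    have hab : (a : Int) < m * m := by omega
    have hcur : PySem.Int.mod ((pst m a).1 + (pst m a).2) m = (pst m (a + 1)).2 := by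
      show PySem.Int.mod ((Nat.fib a : Int) % m + (Nat.fib (a + 1) : Int) % m) m
        = (Nat.fib (a + 1 + 1) : Int) % m
      rw [PySem.Int.mod_eq_emod_of_pos hm0, ← Int.add_emod,
        show ((Nat.fib a : Int) + (Nat.fib (a + 1) : Int)) = (Nat.fib (a + 1 + 1) : Int) from by
          rw [show a + 1 + 1 = a + 2 from rfl, Nat.fib_add_two]; push_cast; ring]
    rw [pisanoLoop]
    by_cases hcond : (pst m a).2 = 0 ∧ PySem.Int.mod ((pst m a).1 + (pst m a).2) m = 1
    · refine ⟨a + 1, by omega, ?_, ?_⟩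
      · have h1 : (pst m (a + 1)).1 = 0 := hcond.1
        have h2 : (pst m (a + 1)).2 = 1 := by rw [← hcur]; exact hcond.2
        exact Prod.ext h1 h2
      · rw [if_pos hcond]
        push_cast
        rfl
    · have hne : pst m (a + 1) ≠ (0, 1) := by
        intro hcontra
        exact hcond ⟨congrArg Prod.fst hcontra, by rw [hcur]; exact congrArg Prod.snd hcontra⟩
      have hja : a + 1 < j := by
        rcases Nat.lt_or_ge (a + 1) j with h | h
        · exact h
        · exfalso; exact hne (by rw [show a + 1 = j from by omega]; exact hj)
      obtain ⟨jr, h1, h2, h3⟩ := ih (a + 1) (by push_cast; push_cast at hfa; omega) ⟨j, hja, hjm, hj⟩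
      refine ⟨jr, h1, h2, ?_⟩
      rw [if_neg hcond]
      rw [hcur]
      have : ((a : Int) + 1) = ((a + 1 : Nat) : Int) := by push_cast; ring
      rw [this]
      exact h3

-- pigeonhole: some period point exists within m*m steps
theorem pisano_exists (m : Int) (hm : 2 ≤ m) :
    ∃ j : Nat, 0 < j ∧ (j : Int) ≤ m * m ∧ pst m j = (0, 1) := by
  set M := m.toNat with hMdef
  have hM : 2 ≤ M := by omega
  have hm' : m = (M : Int) := by omega
  haveI : NeZero M := ⟨by omega⟩
  have ginj : Function.Injective (fun p : ZMod M × ZMod M => (p.2, p.1 + p.2)) := by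
    intro p q h
    have h1 : p.2 = q.2 := congrArg Prod.fst h
    have h2 : p.1 + p.2 = q.1 + q.2 := congrArg Prod.snd h
    rw [h1] at h2
    exact Prod.ext (add_right_cancel h2) h1
  have giter : ∀ t : Nat,
      (fun p : ZMod M × ZMod M => (p.2, p.1 + p.2))^[t] ((0 : ZMod M), (1 : ZMod M))
        = ((Nat.fib t : ZMod M), (Nat.fib (t + 1) : ZMod M)) := by
    intro t
    induction t with
    | zero => simp
    | succ t ih =>
      rw [Function.iterate_succ_apply', ih]
      refine Prod.ext rfl ?_
      show (Nat.fib t : ZMod M) + (Nat.fib (t + 1) : ZMod M) = (Nat.fib (t + 1 + 1) : ZMod M)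
      rw [show t + 1 + 1 = t + 2 from rfl, Nat.fib_add_two]
      push_cast; ring
  have hcard : Fintype.card (ZMod M × ZMod M) < Fintype.card (Fin (M * M + 1)) := by
    rw [Fintype.card_prod, ZMod.card, Fintype.card_fin]
    omega
  obtain ⟨i, j, hne, hfeq⟩ := Fintype.exists_ne_map_eq_of_card_lt
    (fun i : Fin (M * M + 1) => (fun p : ZMod M × ZMod M => (p.2, p.1 + p.2))^[(i : Nat)] (0, 1)) hcard
  have key : ∀ (i j : Fin (M * M + 1)), (i : Nat) < (j : Nat) →
      (fun p : ZMod M × ZMod M => (p.2, p.1 + p.2))^[(j : Nat)] (0, 1)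
        = (fun p : ZMod M × ZMod M => (p.2, p.1 + p.2))^[(i : Nat)] (0, 1) →
      ∃ d : Nat, 0 < d ∧ d ≤ M * M ∧
        (fun p : ZMod M × ZMod M => (p.2, p.1 + p.2))^[d] ((0 : ZMod M), (1 : ZMod M)) = (0, 1) := by
    intro i j hij heq
    have hjlt : (j : Nat) < M * M + 1 := j.isLt
    refine ⟨(j : Nat) - (i : Nat), by omega, by omega, ?_⟩
    have h' : (fun p : ZMod M × ZMod M => (p.2, p.1 + p.2))^[(i : Nat) + ((j : Nat) - (i : Nat))] (0, 1)
        = (fun p : ZMod M × ZMod M => (p.2, p.1 + p.2))^[(i : Nat)] (0, 1) := by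
      rw [show (i : Nat) + ((j : Nat) - (i : Nat)) = (j : Nat) from by omega]
      exact heq
    rw [Function.iterate_add_apply] at h'
    exact ginj.iterate (i : Nat) h'
  have hd : ∃ d : Nat, 0 < d ∧ d ≤ M * M ∧
      (fun p : ZMod M × ZMod M => (p.2, p.1 + p.2))^[d] ((0 : ZMod M), (1 : ZMod M)) = (0, 1) := by
    rcases Nat.lt_or_ge (i : Nat) (j : Nat) with h | h
    · exact key i j h hfeq.symm
    · have h' : (j : Nat) < (i : Nat) := by
        rcases Nat.lt_or_ge (j : Nat) (i : Nat) with h2 | h2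
        · exact h2
        · exact absurd (Fin.ext (by omega)) hne
      exact key j i h' hfeq
  obtain ⟨d, hd0, hdle, hdper⟩ := hd
  rw [giter d] at hdper
  have hfst : (Nat.fib d : ZMod M) = 0 := congrArg Prod.fst hdper
  have hsnd : (Nat.fib (d + 1) : ZMod M) = 1 := congrArg Prod.snd hdper
  have hfd : Nat.fib d % M = 0 := by
    have h0 : (Nat.fib d : ZMod M) = ((0 : Nat) : ZMod M) := by exact_mod_cast hfst
    have := (ZMod.natCast_eq_natCast_iff _ _ _).mp h0
    simpa [Nat.ModEq] using this
  have hfd1 : Nat.fib (d + 1) % M = 1 := by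
    have h1 : (Nat.fib (d + 1) : ZMod M) = ((1 : Nat) : ZMod M) := by exact_mod_cast hsnd
    have h2 := (ZMod.natCast_eq_natCast_iff _ _ _).mp h1
    have h3 : Nat.fib (d + 1) % M = 1 % M := h2
    have h4 : (1 : Nat) % M = 1 := Nat.mod_eq_of_lt (by omega)
    rw [h4] at h3
    exact h3
  refine ⟨d, hd0, ?_, ?_⟩
  · rw [hm']
    exact_mod_cast hdle
  · refine Prod.ext ?_ ?_
    · show (Nat.fib d : Int) % m = 0
      rw [hm', ← Int.natCast_mod, hfd]
      rfl
    · show (Nat.fib (d + 1) : Int) % m = 1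
      rw [hm', ← Int.natCast_mod, hfd1]
      rfl

theorem pisano_period_eq (m : Int) (hm : 2 ≤ m) :
    ∃ jr : Nat, 0 < jr ∧ pst m jr = (0, 1) ∧ pisano_period m = some (jr : Int) := by
  obtain ⟨j, hj0, hjle, hj⟩ := pisano_exists m hm
  obtain ⟨jr, h1, h2, h3⟩ := pisanoLoop_finds m hm (m * m).toNat 0
    (by push_cast; omega) ⟨j, hj0, hjle, hj⟩
  refine ⟨jr, h1, h2, ?_⟩
  have e1 : (pst m 0).1 = 0 := by
    show (Nat.fib 0 : Int) % m = 0
    rw [Nat.fib_zero]; simp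
  have e2 : (pst m 0).2 = 1 := by
    show (Nat.fib 1 : Int) % m = 1
    rw [Nat.fib_one]
    push_cast
    exact Int.emod_eq_of_lt (by norm_num) (by omega)
  rw [e1, e2] at h3
  unfold pisano_period
  rw [show ((0 : Nat) : Int) = (0 : Int) from rfl] at h3
  exact h3

-- a foldl that ignores the list elements is an iterate of its step function
theorem pvFoldlConst {α β : Type} (f : α → α) (l : List β) (init : α) :
    l.foldl (fun st _ => f st) init = f^[l.length] init := by
  induction l generalizing init with
  | nil => rfl
  | cons x xs ih =>
    show xs.foldl (fun st _ => f st) (f init) = f^[xs.length + 1] init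
    rw [ih, Function.iterate_succ_apply]

-- A's summation loop computes (F_r, F_{r+1}, F_r·F_{r+1})
theorem aLoop_eq (r : Nat) :
    Nat.iterate (fun (st : Int × Int × Int) => (st.2.1, st.1 + st.2.1, st.2.2 + st.2.1 ^ 2)) r (0, 1, 0)
      = ((Nat.fib r : Int), (Nat.fib (r + 1) : Int), (Nat.fib r : Int) * Nat.fib (r + 1)) := by
  induction r with
  | zero => norm_num [Nat.fib]
  | succ r ih =>
    rw [Function.iterate_succ_apply', ih]
    have h2 : (Nat.fib (r + 2) : Int) = Nat.fib r + Nat.fib (r + 1) := by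
      rw [Nat.fib_add_two]; push_cast; ring
    refine Prod.ext rfl (Prod.ext ?_ ?_) <;> simp [h2] <;> ring

-- A's value: (F_r · F_{r+1}) % m with r = n mod (found period)
theorem fab_A_eq (n m : Int) (hm : 2 ≤ m) (jr : Nat) (hjr : 0 < jr)
    (hp : pisano_period m = some (jr : Int)) :
    fab_num_remainder n m = ((Nat.fib (n % (jr : Int)).toNat : Int) * Nat.fib ((n % (jr : Int)).toNat + 1)) % m := by
  have hm0 : (0 : Int) < m := by omega
  have hpi : (0 : Int) < (jr : Int) := by exact_mod_cast hjr
  have hmod : PySem.Int.mod n (jr : Int) = n % (jr : Int) :=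
    PySem.Int.mod_eq_emod_of_pos hpi
  have hr : n % (jr : Int) = ((n % (jr : Int)).toNat : Int) :=
    (Int.toNat_of_nonneg (Int.emod_nonneg n (by omega))).symm
  set r := (n % (jr : Int)).toNat with hrdef
  unfold fab_num_remainder
  rw [hp]
  simp only [hmod]
  by_cases h0 : n % (jr : Int) = 0
  · rw [if_pos h0, h0]
    have hr0 : r = 0 := by omega
    rw [hr0, Nat.fib_zero]
    simp
  · rw [if_neg h0]
    have hlen : (PySem.List.pyRange 0 (n % (jr : Int)) 1).length = r := by
      rw [PySem.List.length_pyRange_one]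
      omega
    rw [pvFoldlConst _ _ _, hlen, aLoop_eq r, PySem.Int.mod_eq_emod_of_pos hm0]

-- periodicity of fib mod M with period jr (a period point)
theorem fib_periodic (m : Int) (hm : 2 ≤ m) (jr : Nat) (hst : pst m jr = (0, 1)) :
    ∀ (t a : Nat), (Nat.fib (a + t * jr) : Int) ≡ (Nat.fib a : Int) [ZMOD m] := by
  have hz : (Nat.fib jr : Int) % m = 0 := congrArg Prod.fst hst
  have ho : (Nat.fib (jr + 1) : Int) % m = 1 := congrArg Prod.snd hst
  have hm0 : (0 : Int) < m := by omega
  have hstep : ∀ a : Nat, (Nat.fib (a + jr) : Int) ≡ (Nat.fib a : Int) [ZMOD m] := by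
    intro a
    induction a using Nat.strong_induction_on with
    | _ a ih =>
      match a with
      | 0 =>
        show (Nat.fib (0 + jr) : Int) % m = (Nat.fib 0 : Int) % m
        rw [Nat.zero_add, hz, Nat.fib_zero]
        simp
      | 1 =>
        show (Nat.fib (1 + jr) : Int) % m = (Nat.fib 1 : Int) % m
        rw [Nat.add_comm 1 jr, ho, Nat.fib_one]
        push_cast
        exact (Int.emod_eq_of_lt (by norm_num) (by omega)).symm
      | (a + 2) =>
        have e1 : (Nat.fib (a + 2 + jr) : Int) = Nat.fib (a + jr) + Nat.fib (a + 1 + jr) := by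
          rw [show a + 2 + jr = (a + jr) + 2 from by omega, Nat.fib_add_two,
            show a + jr + 1 = a + 1 + jr from by omega]
          push_cast; ring
        have e2 : (Nat.fib (a + 2) : Int) = Nat.fib a + Nat.fib (a + 1) := by
          rw [Nat.fib_add_two]; push_cast; ring
        rw [e1, e2]
        exact (ih a (by omega)).add (ih (a + 1) (by omega))
  intro t
  induction t with
  | zero => intro a; simp
  | succ t iht =>
    intro a
    have : a + (t + 1) * jr = (a + t * jr) + jr := by ring
    rw [this]
    exact (hstep (a + t * jr)).trans (iht a)

-- the negative-index product identity: if k + r = t·jr (t ≥ 1) then F_{k-1}·F_k ≡ −F_r·F_{r+1}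
theorem fib_neg_product (m : Int) (hm : 2 ≤ m) (jr : Nat) (hst : pst m jr = (0, 1))
    (k r t : Nat) (hk : 0 < k) (ht : 0 < t) (hkr : k + r = t * jr) :
    (Nat.fib (k - 1) : Int) * Nat.fib k ≡ -((Nat.fib r : Int) * Nat.fib (r + 1)) [ZMOD m] := by
  have hper := fib_periodic m hm jr hst
  set a : Int := (Nat.fib r : Int) with hadef
  set b : Int := (Nat.fib (r + 1) : Int) with hbdef
  set X : Int := (Nat.fib (k - 1) : Int) with hXdef
  set Y : Int := (Nat.fib k : Int) with hYdef
  set s : Int := (-1 : Int) ^ (r + 1) with hsdef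
  have hcas : a * Nat.fib (r + 2) - b ^ 2 = s := pvCassini r
  have hcab : (Nat.fib (r + 2) : Int) = a + b := by
    rw [Nat.fib_add_two]; push_cast; ring
  have hcas' : a * (a + b) - b ^ 2 = s := by rw [← hcab]; exact hcas
  have hfk1 : (Nat.fib (k + 1) : Int) = X + Y := by
    rw [show k + 1 = (k - 1) + 2 from by omega, Nat.fib_add_two,
      show k - 1 + 1 = k from by omega]
    push_cast; ring
  have h0 : (Nat.fib (t * jr) : Int) ≡ 0 [ZMOD m] := by
    have := hper t 0
    rw [Nat.zero_add, Nat.fib_zero] at this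
    exact_mod_cast this
  have h1cong : (Nat.fib (1 + t * jr) : Int) ≡ 1 [ZMOD m] := by
    have := hper t 1
    rw [Nat.fib_one] at this
    exact_mod_cast this
  have hadd1 : (Nat.fib (t * jr) : Int) = X * a + Y * b := by
    have h := Nat.fib_add (k - 1) r
    rw [show k - 1 + r + 1 = t * jr from by omega, show k - 1 + 1 = k from by omega] at h
    push_cast [h]; ring
  have h1 : X * a + Y * b ≡ 0 [ZMOD m] := hadd1 ▸ h0
  have hadd2 : (Nat.fib (1 + t * jr) : Int) = Y * a + (X + Y) * b := by
    have h := Nat.fib_add k r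
    rw [show k + r + 1 = 1 + t * jr from by omega] at h
    push_cast [h, hfk1]; ring
  have h2 : Y * a + (X + Y) * b ≡ 1 [ZMOD m] := hadd2 ▸ h1cong
  have h12 := (h1.mul_left (a + b)).sub (h2.mul_left b)
  have heq1 : (a + b) * (X * a + Y * b) - b * (Y * a + (X + Y) * b) = s * X := by
    linear_combination X * hcas'
  rw [heq1] at h12
  have h22 := (h1.mul_left b).sub (h2.mul_left a)
  have heq2 : b * (X * a + Y * b) - a * (Y * a + (X + Y) * b) = -(s * Y) := by
    linear_combination (-Y) * hcas'
  rw [heq2] at h22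
  have hmul := h12.mul h22
  have hss : s * s = 1 := by
    rw [hsdef, ← pow_add]
    exact Even.neg_one_pow ⟨r + 1, by ring⟩
  have hL : s * X * -(s * Y) = -(X * Y) := by linear_combination (-(X * Y)) * hss
  have hR : ((a + b) * 0 - b * 1) * (b * 0 - a * 1) = a * b := by ring
  rw [hL, hR] at hmul
  have := hmul.neg
  rw [neg_neg] at this
  exact this

theorem fab_B_cong (n m : Int) (hm : 2 ≤ m) (jr : Nat) (hjr : 0 < jr) (hst : pst m jr = (0, 1)) :
    fab_num_remainder_alt n m = ((Nat.fib (n % (jr : Int)).toNat : Int) * Nat.fib ((n % (jr : Int)).toNat + 1)) % m := by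
  have hm0 : (0 : Int) < m := by omega
  have hpi : (0 : Int) < (jr : Int) := by exact_mod_cast hjr
  have hper := fib_periodic m hm jr hst
  have hr : n % (jr : Int) = ((n % (jr : Int)).toNat : Int) :=
    (Int.toNat_of_nonneg (Int.emod_nonneg n (by omega))).symm
  set r := (n % (jr : Int)).toNat with hrdef
  have hrlt : (r : Int) < (jr : Int) := by rw [← hr]; exact Int.emod_lt_of_pos n hpi
  rw [fab_num_remainder_alt]
  by_cases hn : n ≥ 0
  · rw [if_pos hn]
    set N := n.toNat with hNdef
    have hnN : n = (N : Int) := (Int.toNat_of_nonneg hn).symm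
    simp only [fibPairMod_eq m hm]
    show PySem.Int.mod (((Nat.fib N : Int) % m) * ((Nat.fib (N + 1) : Int) % m)) m = _
    rw [PySem.Int.mod_eq_emod_of_pos hm0]
    have hNr : N % jr = r := by
      have : ((N % jr : Nat) : Int) = (r : Int) := by
        rw [Int.natCast_mod, ← hnN, ← hr]
      exact_mod_cast this
    have hq : N = r + N / jr * jr := by
      rw [← hNr]
      exact (Nat.mod_add_div' N jr).symm
    obtain ⟨Q, hQ⟩ : ∃ Q, N = r + Q * jr := ⟨N / jr, hq⟩
    have c1 : (Nat.fib N : Int) ≡ (Nat.fib r : Int) [ZMOD m] := by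
      rw [show N = r + Q * jr from hQ]
      exact hper Q r
    have c2 : (Nat.fib (N + 1) : Int) ≡ (Nat.fib (r + 1) : Int) [ZMOD m] := by
      rw [show N + 1 = (r + 1) + Q * jr from by omega]
      exact hper Q (r + 1)
    have e1 : ((Nat.fib N : Int) % m) ≡ (Nat.fib N : Int) [ZMOD m] :=
      Int.emod_emod_of_dvd _ dvd_rfl
    have e2 : ((Nat.fib (N + 1) : Int) % m) ≡ (Nat.fib (N + 1) : Int) [ZMOD m] :=
      Int.emod_emod_of_dvd _ dvd_rfl
    exact ((e1.trans c1).mul (e2.trans c2))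
  · rw [if_neg hn]
    set k := (-n).toNat with hkdef
    have hk1 : 0 < k := by omega
    have hnk : n = -(k : Int) := by omega
    simp only [fibPairMod_eq m hm]
    have hq := Int.ediv_add_emod n (jr : Int)
    set q : Int := n / (jr : Int) with hqdef
    have hqneg : q < 0 := by
      by_contra hq0
      push_neg at hq0
      have h1 : 0 ≤ (jr : Int) * q := mul_nonneg (by omega) hq0
      omega
    set t := (-q).toNat with htdef
    have ht : 0 < t := by omega
    have htq : (t : Int) = -q := by omega
    have hkrt : k + r = t * jr := by
      have hZ : (k : Int) + (r : Int) = (t : Int) * (jr : Int) := by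
        rw [htq, ← hr]
        linear_combination hq + hnk
      exact_mod_cast hZ
    have hXY := fib_neg_product m hm jr hst k r t hk1 ht hkrt
    have hfkm1 : (Nat.fib (k + 1) : Int) - (Nat.fib k : Int) = (Nat.fib (k - 1) : Int) := by
      rw [show k + 1 = (k - 1) + 2 from by omega, Nat.fib_add_two,
        show k - 1 + 1 = k from by omega]
      push_cast; ring
    have eu : ((Nat.fib k : Int) % m) ≡ (Nat.fib k : Int) [ZMOD m] :=
      Int.emod_emod_of_dvd _ dvd_rfl
    have ev : ((Nat.fib (k + 1) : Int) % m) ≡ (Nat.fib (k + 1) : Int) [ZMOD m] :=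
      Int.emod_emod_of_dvd _ dvd_rfl
    set u : Int := (Nat.fib k : Int) % m with hudef
    set v : Int := (Nat.fib (k + 1) : Int) % m with hvdef
    show PySem.Int.mod
        (PySem.Int.mod (if k % 2 = 1 then u else -u) m *
          PySem.Int.mod (if k % 2 = 0 then v - u else u - v) m) m = _
    rw [PySem.Int.mod_eq_emod_of_pos hm0, PySem.Int.mod_eq_emod_of_pos hm0,
      PySem.Int.mod_eq_emod_of_pos hm0]
    have ea : ((if k % 2 = 1 then u else -u) % m) ≡ (if k % 2 = 1 then u else -u) [ZMOD m] :=
      Int.emod_emod_of_dvd _ dvd_rfl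
    have eb : ((if k % 2 = 0 then v - u else u - v) % m) ≡ (if k % 2 = 0 then v - u else u - v) [ZMOD m] :=
      Int.emod_emod_of_dvd _ dvd_rfl
    have hab : (if k % 2 = 1 then u else -u) * (if k % 2 = 0 then v - u else u - v)
        ≡ -((Nat.fib (k - 1) : Int) * (Nat.fib k : Int)) [ZMOD m] := by
      by_cases hpar : k % 2 = 1
      · rw [if_pos hpar, if_neg (by omega)]
        have := eu.mul (eu.sub ev)
        refine this.trans ?_
        rw [show ((Nat.fib k : Int) - (Nat.fib (k + 1) : Int)) = -(Nat.fib (k - 1) : Int) from by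
          linear_combination -hfkm1]
        ring_nf
        exact Int.ModEq.refl _
      · rw [if_neg hpar, if_pos (by omega)]
        have := (eu.neg).mul (ev.sub eu)
        refine this.trans ?_
        rw [show ((Nat.fib (k + 1) : Int) - (Nat.fib k : Int)) = (Nat.fib (k - 1) : Int) from hfkm1]
        ring_nf
        exact Int.ModEq.refl _
    have hfin : (-((Nat.fib (k - 1) : Int) * (Nat.fib k : Int))) ≡
        ((Nat.fib r : Int) * (Nat.fib (r + 1) : Int)) [ZMOD m] := by
      have := hXY.neg
      rwa [neg_neg] at this
    exact (ea.mul eb).trans (hab.trans hfin)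

-- ===== VERDICT (by name: the statement is the Claim_ definition above) =====
theorem fab_num_remainder_spec : Claim_equal_fab_num_remainder := by
  intro n m _ hm
  obtain ⟨jr, hjr, hst, hp⟩ := pisano_period_eq m hm
  unfold Spec_fab_num_remainder
  rw [fab_A_eq n m hm jr hjr hp, fab_B_cong n m hm jr hjr hst]
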